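-- pv_equiv track=rewrite | github.com/Dan1l0s/DiscordBots | bots/admin_bot.py | get_prev_rank
-- ===== SOURCE A (Python) =====
-- def get_prev_rank(voice_xp, text_xp, ranks):
--     curr_rank_flag = False
--     for voice_xp_req, text_xp_req, rank_id, remove_flag in ranks:
--         if voice_xp >= voice_xp_req and text_xp >= text_xp_req and remove_flag:
--             if not curr_rank_flag:
--                 curr_rank_flag = True
--             else:
--                 return rank_id
--     return None
-- ===== SOURCE B (Python) =====
-- def get_prev_rank(voice_xp, text_xp, ranks):
--     # Two-phase recursive decomposition: skip forward to the first qualifying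
--     # row, then hand the rest of the list to a separate "find first" phase.
--     def qualifies(row):
--         voice_xp_req, text_xp_req, rank_id, remove_flag = row
--         return voice_xp >= voice_xp_req and text_xp >= text_xp_req and remove_flag
--
--     def find_first(rest):
--         if not rest:
--             return None
--         if qualifies(rest[0]):
--             return rest[0][2]
--         return find_first(rest[1:])
--
--     def after_first(rest):
--         if not rest:
--             return None
--         if qualifies(rest[0]):
--             return find_first(rest[1:])
--         return after_first(rest[1:])
--
--     return after_first(ranks)
-- ===== Notes on version B (the rewrite author's own statement) =====
-- stated objective: alternative
-- what changed: Replaces the single loop with a boolean seen-flag by a two-phase structural recursion: one recursive function skips to the first qualifying row, then delegates the remainder to a second recursive function that returns the first qualifying rank_id there.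
import Mathlib
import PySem

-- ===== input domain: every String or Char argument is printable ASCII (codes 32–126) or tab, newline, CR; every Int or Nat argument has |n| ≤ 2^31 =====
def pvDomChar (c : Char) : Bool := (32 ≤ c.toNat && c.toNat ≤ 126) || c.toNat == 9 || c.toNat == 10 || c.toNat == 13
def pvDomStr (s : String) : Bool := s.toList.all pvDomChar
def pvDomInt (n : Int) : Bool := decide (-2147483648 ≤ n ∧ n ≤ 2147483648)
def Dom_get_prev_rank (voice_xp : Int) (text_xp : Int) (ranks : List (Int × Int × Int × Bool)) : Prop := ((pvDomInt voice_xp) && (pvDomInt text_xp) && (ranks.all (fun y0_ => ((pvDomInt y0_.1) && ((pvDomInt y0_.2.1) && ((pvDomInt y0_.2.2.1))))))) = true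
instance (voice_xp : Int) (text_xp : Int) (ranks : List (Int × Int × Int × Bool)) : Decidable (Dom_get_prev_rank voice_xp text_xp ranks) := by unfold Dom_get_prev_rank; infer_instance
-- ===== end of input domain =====

-- B replaces A's seen-flag loop with a two-phase recursion (skip to first match, then find next match); same value, alternative decomposition.

-- ===== PORT A =====
-- A: one pass with a boolean flag; returns the second qualifying rank_id.
def get_prev_rank_go (voice_xp : Int) (text_xp : Int) (curr_rank_flag : Bool) : List (Int × Int × Int × Bool) → Option Int
  | [] => none
  | (voice_xp_req, text_xp_req, rank_id, remove_flag) :: rest =>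
    if voice_xp ≥ voice_xp_req && text_xp ≥ text_xp_req && remove_flag then
      if !curr_rank_flag then get_prev_rank_go voice_xp text_xp true rest
      else some rank_id
    else get_prev_rank_go voice_xp text_xp curr_rank_flag rest

def get_prev_rank (voice_xp : Int) (text_xp : Int) (ranks : List (Int × Int × Int × Bool)) : Option Int :=
  get_prev_rank_go voice_xp text_xp false ranks

-- ===== PORT B =====
-- B's qualifies(row)
def gpr_qualifies (voice_xp : Int) (text_xp : Int) (row : Int × Int × Int × Bool) : Bool :=
  voice_xp ≥ row.1 && text_xp ≥ row.2.1 && row.2.2.2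

-- B's find_first: first qualifying rank_id in the remainder
def gpr_find_first (voice_xp : Int) (text_xp : Int) : List (Int × Int × Int × Bool) → Option Int
  | [] => none
  | row :: rest =>
    if gpr_qualifies voice_xp text_xp row then some row.2.2.1
    else gpr_find_first voice_xp text_xp rest

-- B's after_first: skip to the first qualifying row, then delegate
def gpr_after_first (voice_xp : Int) (text_xp : Int) : List (Int × Int × Int × Bool) → Option Int
  | [] => none
  | row :: rest =>
    if gpr_qualifies voice_xp text_xp row then gpr_find_first voice_xp text_xp rest
    else gpr_after_first voice_xp text_xp rest

def get_prev_rank_alt (voice_xp : Int) (text_xp : Int) (ranks : List (Int × Int × Int × Bool)) : Option Int :=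
  gpr_after_first voice_xp text_xp ranks

-- ===== PRECONDITION & SPEC =====
def Spec_get_prev_rank (voice_xp : Int) (text_xp : Int) (ranks : List (Int × Int × Int × Bool)) (out : Option Int) : Prop := out = get_prev_rank_alt voice_xp text_xp ranks
instance (voice_xp : Int) (text_xp : Int) (ranks : List (Int × Int × Int × Bool)) (out : Option Int) : Decidable (Spec_get_prev_rank voice_xp text_xp ranks out) := by unfold Spec_get_prev_rank; infer_instance

-- ===== CLAIM (what is proved, stated in full; the proofs are below) =====
def Claim_equal_get_prev_rank : Prop := ∀ (voice_xp : Int) (text_xp : Int) (ranks : List (Int × Int × Int × Bool)), Dom_get_prev_rank voice_xp text_xp ranks → Spec_get_prev_rank voice_xp text_xp ranks (get_prev_rank voice_xp text_xp ranks)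

-- ===== LEMMAS AND PROOFS =====
-- A's loop with flag set agrees with B's find_first; with flag clear, with B's after_first.
theorem get_prev_rank_go_true (voice_xp text_xp : Int) (l : List (Int × Int × Int × Bool)) :
    get_prev_rank_go voice_xp text_xp true l = gpr_find_first voice_xp text_xp l := by
  induction l with
  | nil => rfl
  | cons hd tl ih =>
    obtain ⟨v, t, id, rm⟩ := hd
    by_cases h : (voice_xp ≥ v && text_xp ≥ t && rm) = true <;>
      simp [get_prev_rank_go, gpr_find_first, gpr_qualifies, h, ih]

theorem get_prev_rank_go_false (voice_xp text_xp : Int) (l : List (Int × Int × Int × Bool)) :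
    get_prev_rank_go voice_xp text_xp false l = gpr_after_first voice_xp text_xp l := by
  induction l with
  | nil => rfl
  | cons hd tl ih =>
    obtain ⟨v, t, id, rm⟩ := hd
    by_cases h : (voice_xp ≥ v && text_xp ≥ t && rm) = true <;>
      simp [get_prev_rank_go, gpr_after_first, gpr_qualifies, h, ih, get_prev_rank_go_true]

-- ===== VERDICT (by name: the statement is the Claim_ definition above) =====
theorem get_prev_rank_spec : Claim_equal_get_prev_rank := by
  intro voice_xp text_xp ranks _
  unfold Spec_get_prev_rank get_prev_rank get_prev_rank_alt
  exact get_prev_rank_go_false voice_xp text_xp ranks
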